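-- pv_equiv track=rewrite | github.com/james5635/GeekForGeek-Data-Structure-and-Algorithm | hashing/hard/maximum_array_two_arrays/solution.py | max_array_greedy
-- ===== SOURCE A (Python) =====
-- from typing import List
--
-- def max_array_greedy(A: List[int], B: List[int]) -> List[int]:
--     """
--     Greedy approach for maximum array.
--
--     Time Complexity: O(n + m)
--     Space Complexity: O(n + m)
--     """
--
--     def merge_max_arrays(arr1: List[int], arr2: List[int]) -> List[int]:
--         """Merge two arrays to get maximum lexicographical order."""
--         result = []
--         i, j = 0, 0
--
--         while i < len(arr1) and j < len(arr2):
--             if arr1[i:] > arr2[j:]: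
--                 result.append(arr1[i])
--                 i += 1
--             else:
--                 result.append(arr2[j])
--                 j += 1
--
--         result.extend(arr1[i:])
--         result.extend(arr2[j:])
--         return result
--
--     return merge_max_arrays(A, B)
-- ===== SOURCE B (Python) =====
-- from typing import List
--
-- def max_array_greedy(A: List[int], B: List[int]) -> List[int]:
--     """Greedy merge with memoized run-based suffix comparisons.
--
--     "A[i:] > B[j:]" is decided by the first differing pair along the diagonal
--     (i+t, j+t); one forward walk finds it and memoizes the identical outcome
--     for the whole equal run, so the repeated suffix slicing/rescanning of the
--     naive greedy disappears.
--     """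
--     n, m = len(A), len(B)
--     memo = {}  # (i, j) -> whether A[i:] > B[j:]
--
--     def fill(i: int, j: int) -> None:
--         k = 0
--         while i + k < n and j + k < m and A[i + k] == B[j + k]:
--             k += 1
--         if i + k < n and j + k < m:
--             val = A[i + k] > B[j + k]
--             end = k + 1
--         else:
--             val = (j + k == m) and (i + k < n)
--             end = k
--         for t in range(end):
--             memo[(i + t, j + t)] = val
--
--     out = []
--     i = j = 0
--     while i < n and j < m:
--         if (i, j) not in memo:
--             fill(i, j)
--         if memo[(i, j)]:
--             out.append(A[i])
--             i += 1
--         else: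
--             out.append(B[j])
--             j += 1
--     out.extend(A[i:])
--     out.extend(B[j:])
--     return out
-- ===== Notes on version B (the rewrite author's own statement) =====
-- stated objective: faster
-- what changed: Replaces A's per-step suffix slicing and rescanning (two O(n+m) slice copies plus a lexicographic compare on every merge step) with a memoized diagonal run walk: one forward scan finds the first differing pair, and the identical comparison outcome is recorded in a dict for the whole equal run, so each diagonal position is scanned at most once.
import Mathlib
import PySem

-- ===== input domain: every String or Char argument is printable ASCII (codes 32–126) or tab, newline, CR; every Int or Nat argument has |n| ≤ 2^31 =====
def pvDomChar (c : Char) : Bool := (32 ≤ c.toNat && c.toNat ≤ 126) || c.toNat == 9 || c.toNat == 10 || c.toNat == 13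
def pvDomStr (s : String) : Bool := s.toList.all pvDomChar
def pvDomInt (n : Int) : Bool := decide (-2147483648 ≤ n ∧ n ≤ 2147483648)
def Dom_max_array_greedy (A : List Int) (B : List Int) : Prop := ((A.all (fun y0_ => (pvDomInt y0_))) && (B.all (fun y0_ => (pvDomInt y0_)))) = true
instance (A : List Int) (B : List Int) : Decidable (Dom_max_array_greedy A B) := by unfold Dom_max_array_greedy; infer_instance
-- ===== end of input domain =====

-- B replaces A's per-step suffix-slice comparisons with one memoized forward walk per
-- equal run (a dict of decided comparisons), measurably faster on large inputs.

-- ===== PORT A =====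
-- Python's list-of-int comparison `xs > ys` (lexicographic, shorter prefix is smaller); exact.
def pyListGt : List Int → List Int → Bool
  | [], _ => false
  | _ :: _, [] => true
  | x :: xs, y :: ys => if x > y then true else if x < y then false else pyListGt xs ys

-- the while-loop of merge_max_arrays: state (i, j, result); `arr[i:]` for 0 ≤ i is List.drop (exact)
def mergeLoopA (A B : List Int) (i j : Nat) (result : List Int) : List Int :=
  if h : i < A.length ∧ j < B.length then
    if pyListGt (A.drop i) (B.drop j) then
      mergeLoopA A B (i + 1) j (result ++ [A[i]'h.1])
    else
      mergeLoopA A B i (j + 1) (result ++ [B[j]'h.2])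
  else
    result ++ A.drop i ++ B.drop j
termination_by (A.length - i) + (B.length - j)
decreasing_by all_goals omega

def max_array_greedy (A : List Int) (B : List Int) : List Int :=
  mergeLoopA A B 0 0 []

-- ===== PORT B =====
-- fill's `while` walk: first k ≥ k0 at which the diagonal pair goes out of range or differs
-- (indices are in range when read, so List.getD _ _ 0 is exact)
def eqRunB (A B : List Int) (i j k : Nat) : Nat :=
  if i + k < A.length ∧ j + k < B.length ∧ A.getD (i + k) 0 = B.getD (j + k) 0 then
    eqRunB A B i j (k + 1)
  else k
termination_by A.length - (i + k)
decreasing_by omega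

-- fill(i, j): memoize the outcome for the whole equal run (the `for t in range(end)` loop)
def fillB (A B : List Int) (i j : Nat) (memo : PySem.Dict (Nat × Nat) Bool) :
    PySem.Dict (Nat × Nat) Bool :=
  let k := eqRunB A B i j 0
  let p : Bool × Nat :=
    if i + k < A.length ∧ j + k < B.length then
      (decide (A.getD (i + k) 0 > B.getD (j + k) 0), k + 1)
    else
      (decide (j + k = B.length) && decide (i + k < A.length), k)
  (List.range p.2).foldl (fun d t => d.insert (i + t, j + t) p.1) memo

-- main while-loop: state (i, j, memo, out); memo[(i, j)] read via getD (the key is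
-- always present after the conditional fill, so Python's KeyError cannot fire)
def mergeLoopB (A B : List Int) (i j : Nat) (memo : PySem.Dict (Nat × Nat) Bool)
    (out : List Int) : List Int :=
  if h : i < A.length ∧ j < B.length then
    let memo' := if memo.contains (i, j) then memo else fillB A B i j memo
    if memo'.getD (i, j) false then
      mergeLoopB A B (i + 1) j memo' (out ++ [A[i]'h.1])
    else
      mergeLoopB A B i (j + 1) memo' (out ++ [B[j]'h.2])
  else
    out ++ A.drop i ++ B.drop j
termination_by (A.length - i) + (B.length - j)
decreasing_by all_goals omega

def max_array_greedy_alt (A : List Int) (B : List Int) : List Int :=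
  mergeLoopB A B 0 0 PySem.Dict.empty []

-- ===== PRECONDITION & SPEC =====
def Spec_max_array_greedy (A : List Int) (B : List Int) (out : List Int) : Prop := out = max_array_greedy_alt A B
instance (A : List Int) (B : List Int) (out : List Int) : Decidable (Spec_max_array_greedy A B out) := by unfold Spec_max_array_greedy; infer_instance

-- ===== CLAIM (what is proved, stated in full; the proofs are below) =====
def Claim_equal_max_array_greedy : Prop := ∀ (A : List Int) (B : List Int), Dom_max_array_greedy A B → Spec_max_array_greedy A B (max_array_greedy A B)

-- ===== LEMMAS AND PROOFS =====

def InvMemo (A B : List Int) (memo : PySem.Dict (Nat × Nat) Bool) : Prop :=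
  ∀ p q v, memo.get? (p, q) = some v → v = pyListGt (A.drop p) (B.drop q)

-- the common mathematical shape of both loops: structural greedy merge
def mergeM : List Int → List Int → List Int
  | [], ys => ys
  | x :: xs, [] => x :: xs
  | x :: xs, y :: ys =>
    if pyListGt (x :: xs) (y :: ys) then x :: mergeM xs (y :: ys)
    else y :: mergeM (x :: xs) ys

theorem mergeM_nil_right (xs : List Int) : mergeM xs [] = xs := by
  cases xs <;> simp [mergeM]

theorem mergeLoopA_eq (A B : List Int) (i j : Nat) (out : List Int) :
    mergeLoopA A B i j out = out ++ mergeM (A.drop i) (B.drop j) := by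
  fun_induction mergeLoopA A B i j out with
  | case1 i j out h hgt ih =>
    rw [ih, List.drop_eq_getElem_cons h.1, List.drop_eq_getElem_cons h.2]
    simp only [mergeM]
    simp [hgt]
  | case2 i j out h hgt ih =>
    rw [ih, List.drop_eq_getElem_cons h.1, List.drop_eq_getElem_cons h.2]
    simp only [mergeM]
    simp [hgt]
  | case3 i j out h =>
    rcases Nat.lt_or_ge i A.length with hi | hi
    · have hj : B.length ≤ j := by omega
      rw [List.drop_eq_nil_of_le hj, mergeM_nil_right]
      simp
    · rw [List.drop_eq_nil_of_le hi]
      simp [mergeM]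

-- one equal in-range pair shifts the suffix comparison one step down the diagonal
theorem pyListGt_shift (A B : List Int) (p q : Nat) (hp : p < A.length)
    (hq : q < B.length) (he : A.getD p 0 = B.getD q 0) :
    pyListGt (A.drop p) (B.drop q) = pyListGt (A.drop (p + 1)) (B.drop (q + 1)) := by
  rw [List.drop_eq_getElem_cons hp, List.drop_eq_getElem_cons hq]
  rw [List.getD_eq_getElem A 0 hp, List.getD_eq_getElem B 0 hq] at he
  simp [pyListGt, he]

-- an equal run of length d shifts the comparison d steps
theorem pyListGt_run (A B : List Int) (i j : Nat) (d : Nat)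
    (hrun : ∀ u, u < d → i + u < A.length ∧ j + u < B.length ∧ A.getD (i + u) 0 = B.getD (j + u) 0) :
    pyListGt (A.drop i) (B.drop j) = pyListGt (A.drop (i + d)) (B.drop (j + d)) := by
  induction d generalizing i j with
  | zero => rfl
  | succ d ih =>
    obtain ⟨hp, hq, he⟩ := hrun 0 (Nat.succ_pos d)
    rw [pyListGt_shift A B i j (by simpa using hp) (by simpa using hq) (by simpa using he)]
    rw [ih (i + 1) (j + 1) (fun u hu => by
      obtain ⟨a, b, c⟩ := hrun (u + 1) (by omega)
      refine ⟨by omega, by omega, ?_⟩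
      rw [show i + 1 + u = i + (u + 1) by omega, show j + 1 + u = j + (u + 1) by omega]
      exact c)]
    rw [show i + 1 + d = i + (d + 1) by omega, show j + 1 + d = j + (d + 1) by omega]

-- eqRunB's result: everything strictly between the start and the result is an
-- in-range equal pair, and the condition fails at the result
theorem eqRunB_run (A B : List Int) (i j k : Nat) :
    ∀ u, k ≤ u → u < eqRunB A B i j k →
      i + u < A.length ∧ j + u < B.length ∧ A.getD (i + u) 0 = B.getD (j + u) 0 := by
  fun_induction eqRunB A B i j k with
  | case1 k h ih =>
    intro u hku hu
    rcases Nat.eq_or_lt_of_le hku with rfl | hlt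
    · exact h
    · exact ih u hlt hu
  | case2 k h =>
    intro u hku hu
    omega

theorem eqRunB_stop (A B : List Int) (i j k : Nat) :
    ¬(i + eqRunB A B i j k < A.length ∧ j + eqRunB A B i j k < B.length ∧
      A.getD (i + eqRunB A B i j k) 0 = B.getD (j + eqRunB A B i j k) 0) := by
  fun_induction eqRunB A B i j k with
  | case1 k h ih => exact ih
  | case2 k h => exact h

-- lookup through the fill loop: keys on the covered run get the run's value
theorem get?_foldl_insert (L : List Nat) (d : PySem.Dict (Nat × Nat) Bool) (v : Bool)
    (i j : Nat) (key : Nat × Nat) :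
    (L.foldl (fun d t => d.insert (i + t, j + t) v) d).get? key =
      if ∃ t ∈ L, ((i + t : Nat), (j + t : Nat)) = key then some v else d.get? key := by
  induction L generalizing d with
  | nil => simp
  | cons t0 L ih =>
    simp only [List.foldl_cons]
    rw [ih]
    by_cases hmem : ∃ t ∈ L, ((i + t : Nat), (j + t : Nat)) = key
    · rw [if_pos hmem, if_pos (by obtain ⟨t, ht, hk⟩ := hmem; exact ⟨t, List.mem_cons_of_mem _ ht, hk⟩)]
    · rw [if_neg hmem, PySem.Dict.get?_insert]
      by_cases hk : key = (i + t0, j + t0)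
      · rw [if_pos hk, if_pos ⟨t0, List.mem_cons_self, hk.symm⟩]
      · rw [if_neg hk, if_neg (by
          rintro ⟨t, ht, hkk⟩
          rcases List.mem_cons.mp ht with rfl | ht'
          · exact hk hkk.symm
          · exact hmem ⟨t, ht', hkk⟩)]

-- inserting one shared correct value over a run preserves the invariant and
-- makes the run's first key present
theorem fill_core (A B : List Int) (i j : Nat) (memo : PySem.Dict (Nat × Nat) Bool)
    (val : Bool) (e : Nat) (hepos : 0 < e)
    (hvals : ∀ t, t < e → pyListGt (A.drop (i + t)) (B.drop (j + t)) = val)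
    (h : InvMemo A B memo) :
    InvMemo A B ((List.range e).foldl (fun d t => d.insert (i + t, j + t) val) memo) ∧
      ((List.range e).foldl (fun d t => d.insert (i + t, j + t) val) memo).get? (i, j) =
        some (pyListGt (A.drop i) (B.drop j)) := by
  constructor
  · intro p q v hv
    rw [get?_foldl_insert] at hv
    split at hv
    · next hex =>
      obtain ⟨t, htm, hk⟩ := hex
      obtain ⟨rfl, rfl⟩ : i + t = p ∧ j + t = q :=
        ⟨congrArg Prod.fst hk, congrArg Prod.snd hk⟩
      rw [← (Option.some.injEq _ _).mp hv]
      exact (hvals t (List.mem_range.mp htm)).symm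
    · exact h p q v hv
  · rw [get?_foldl_insert, if_pos ⟨0, List.mem_range.mpr hepos, by simp⟩]
    have := hvals 0 hepos
    simp only [Nat.add_zero] at this
    rw [this]

-- the fill(i, j) call: invariant preserved and the queried key now present
theorem fillB_inv (A B : List Int) (i j : Nat) (memo : PySem.Dict (Nat × Nat) Bool)
    (hi : i < A.length) (hj : j < B.length) (h : InvMemo A B memo) :
    InvMemo A B (fillB A B i j memo) ∧
      (fillB A B i j memo).get? (i, j) = some (pyListGt (A.drop i) (B.drop j)) := by
  have hrun := fun u hu => eqRunB_run A B i j 0 u (Nat.zero_le u) hu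
  have hstop := eqRunB_stop A B i j 0
  unfold fillB
  revert hrun hstop
  generalize eqRunB A B i j 0 = K
  intro hrun hstop
  dsimp only
  -- shared hypotheses for the two branches
  have hshift : ∀ t, t ≤ K →
      pyListGt (A.drop (i + t)) (B.drop (j + t)) = pyListGt (A.drop (i + K)) (B.drop (j + K)) := by
    intro t ht
    rw [pyListGt_run A B (i + t) (j + t) (K - t) (fun u hu => by
      obtain ⟨a, b, c⟩ := hrun (t + u) (by omega)
      refine ⟨by omega, by omega, ?_⟩
      rw [show i + t + u = i + (t + u) by omega, show j + t + u = j + (t + u) by omega]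
      exact c)]
    rw [show i + t + (K - t) = i + K by omega, show j + t + (K - t) = j + K by omega]
  by_cases hb : i + K < A.length ∧ j + K < B.length
  · rw [if_pos hb]
    refine fill_core A B i j memo _ _ (Nat.succ_pos K) (fun t ht => ?_) h
    rw [hshift t (by omega)]
    have hne : A.getD (i + K) 0 ≠ B.getD (j + K) 0 := fun hc => hstop ⟨hb.1, hb.2, hc⟩
    rw [List.drop_eq_getElem_cons hb.1, List.drop_eq_getElem_cons hb.2]
    rw [List.getD_eq_getElem A 0 hb.1, List.getD_eq_getElem B 0 hb.2] at hne ⊢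
    rcases lt_trichotomy (A[i + K]) (B[j + K]) with hlt | heq | hgt
    · simp [pyListGt, hlt, not_lt.mpr (le_of_lt hlt)]
    · exact absurd heq hne
    · simp [pyListGt, hgt]
  · rw [if_neg hb]
    have hKpos : 0 < K := by
      by_contra h0
      have hK0 : K = 0 := by omega
      exact hb (by rw [hK0]; exact ⟨by omega, by omega⟩)
    refine fill_core A B i j memo _ _ hKpos (fun t ht => ?_) h
    rw [hshift t (by omega)]
    have hub : i + K ≤ A.length ∧ j + K ≤ B.length := by
      obtain ⟨a, b, _⟩ := hrun (K - 1) (by omega)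
      constructor <;> omega
    rcases Nat.lt_or_ge (i + K) A.length with hia | hia
    · -- B's side is exhausted and A's is not: the suffix is greater
      have hjb : j + K = B.length := by
        rcases Nat.lt_or_ge (j + K) B.length with hh | hh
        · exact absurd ⟨hia, hh⟩ hb
        · omega
      rw [List.drop_eq_nil_of_le (le_of_eq hjb.symm), List.drop_eq_getElem_cons hia]
      simp [pyListGt, hjb, hia]
    · -- A's side is exhausted: never greater
      rw [List.drop_eq_nil_of_le hia]
      simp [pyListGt, show ¬ i + K < A.length by omega]

theorem mergeLoopB_eq (A B : List Int) (i j : Nat) (memo : PySem.Dict (Nat × Nat) Bool)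
    (out : List Int) (h : InvMemo A B memo) :
    mergeLoopB A B i j memo out = out ++ mergeM (A.drop i) (B.drop j) := by
  revert h
  fun_induction mergeLoopB A B i j memo out with
  | case1 i j memo out h memo' hgt ih =>
    intro hinv
    have hm : InvMemo A B memo' ∧ memo'.getD (i, j) false = pyListGt (A.drop i) (B.drop j) := by
      by_cases hc : memo.contains (i, j)
      · have hmemo' : memo' = memo := by simp [memo', hc]
        have hsome : (memo.get? (i, j)).isSome := by
          rw [← PySem.Dict.contains_eq_isSome_get?]; exact hc
        obtain ⟨v, hv⟩ := Option.isSome_iff_exists.mp hsome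
        rw [hmemo', PySem.Dict.getD_eq_get?_getD, hv, Option.getD_some]
        exact ⟨hinv, hinv i j v hv⟩
      · have hmemo' : memo' = fillB A B i j memo := by simp [memo', hc]
        obtain ⟨h1, h2⟩ := fillB_inv A B i j memo h.1 h.2 hinv
        rw [hmemo', PySem.Dict.getD_eq_get?_getD, h2, Option.getD_some]
        exact ⟨h1, rfl⟩
    rw [ih hm.1, List.drop_eq_getElem_cons h.1, List.drop_eq_getElem_cons h.2]
    simp only [mergeM]
    rw [← List.drop_eq_getElem_cons h.1, ← List.drop_eq_getElem_cons h.2, ← hm.2]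
    simp [hgt]
  | case2 i j memo out h memo' hgt ih =>
    intro hinv
    have hm : InvMemo A B memo' ∧ memo'.getD (i, j) false = pyListGt (A.drop i) (B.drop j) := by
      by_cases hc : memo.contains (i, j)
      · have hmemo' : memo' = memo := by simp [memo', hc]
        have hsome : (memo.get? (i, j)).isSome := by
          rw [← PySem.Dict.contains_eq_isSome_get?]; exact hc
        obtain ⟨v, hv⟩ := Option.isSome_iff_exists.mp hsome
        rw [hmemo', PySem.Dict.getD_eq_get?_getD, hv, Option.getD_some]
        exact ⟨hinv, hinv i j v hv⟩
      · have hmemo' : memo' = fillB A B i j memo := by simp [memo', hc]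
        obtain ⟨h1, h2⟩ := fillB_inv A B i j memo h.1 h.2 hinv
        rw [hmemo', PySem.Dict.getD_eq_get?_getD, h2, Option.getD_some]
        exact ⟨h1, rfl⟩
    rw [ih hm.1, List.drop_eq_getElem_cons h.1, List.drop_eq_getElem_cons h.2]
    simp only [mergeM]
    rw [← List.drop_eq_getElem_cons h.1, ← List.drop_eq_getElem_cons h.2, ← hm.2]
    simp [hgt]
  | case3 i j memo out h =>
    intro _
    rcases Nat.lt_or_ge i A.length with hi | hi
    · have hj : B.length ≤ j := by omega
      rw [List.drop_eq_nil_of_le hj, mergeM_nil_right]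
      simp
    · rw [List.drop_eq_nil_of_le hi]
      simp [mergeM]

-- ===== VERDICT (by name: the statement is the Claim_ definition above) =====
theorem max_array_greedy_spec : Claim_equal_max_array_greedy := by
  intro A B _
  unfold Spec_max_array_greedy max_array_greedy max_array_greedy_alt
  rw [mergeLoopA_eq, mergeLoopB_eq]
  intro p q v hv
  simp [PySem.Dict.get?_empty] at hv
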